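-- pv_equiv track=rewrite | github.com/tkirill/adventofcode | 2021/19_beacon_scanner.py | orientations
-- ===== SOURCE A (Python) =====
-- def roll(v):
--     '''Roll over X 90 degree counter-clockwise'''
--     return (v[0],v[2],-v[1])
--
-- def turn(v):
--     '''Turn over Z 90 degree counter-clockwise'''
--     return (-v[1],v[0],v[2])
--
-- def orientations(v):
--     '''All 24 orientations'''
--     for around_x in range(4):
--         for around_z in range(4):
--             yield v
--             v = turn(v)
--         v = roll(v)
--     v = roll(turn(v))
--     for around_z in range(4):
--         yield v
--         v = turn(v)
--     v = roll(roll(v))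
--     for around_z in range(4):
--         yield v
--         v = turn(v)
-- ===== SOURCE B (Python) =====
-- # Fixed table of the 24 proper rotation matrices, in the exact order A emits
-- # its orientations; B applies each matrix to v in one flat pass.
-- _ROT = (
--     ((1, 0, 0), (0, 1, 0), (0, 0, 1)),
--     ((0, -1, 0), (1, 0, 0), (0, 0, 1)),
--     ((-1, 0, 0), (0, -1, 0), (0, 0, 1)),
--     ((0, 1, 0), (-1, 0, 0), (0, 0, 1)),
--     ((1, 0, 0), (0, 0, 1), (0, -1, 0)),
--     ((0, 0, -1), (1, 0, 0), (0, -1, 0)),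
--     ((-1, 0, 0), (0, 0, -1), (0, -1, 0)),
--     ((0, 0, 1), (-1, 0, 0), (0, -1, 0)),
--     ((1, 0, 0), (0, -1, 0), (0, 0, -1)),
--     ((0, 1, 0), (1, 0, 0), (0, 0, -1)),
--     ((-1, 0, 0), (0, 1, 0), (0, 0, -1)),
--     ((0, -1, 0), (-1, 0, 0), (0, 0, -1)),
--     ((1, 0, 0), (0, 0, -1), (0, 1, 0)),
--     ((0, 0, 1), (1, 0, 0), (0, 1, 0)),
--     ((-1, 0, 0), (0, 0, 1), (0, 1, 0)),
--     ((0, 0, -1), (-1, 0, 0), (0, 1, 0)),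
--     ((0, -1, 0), (0, 0, 1), (-1, 0, 0)),
--     ((0, 0, -1), (0, -1, 0), (-1, 0, 0)),
--     ((0, 1, 0), (0, 0, -1), (-1, 0, 0)),
--     ((0, 0, 1), (0, 1, 0), (-1, 0, 0)),
--     ((0, -1, 0), (0, 0, -1), (1, 0, 0)),
--     ((0, 0, 1), (0, -1, 0), (1, 0, 0)),
--     ((0, 1, 0), (0, 0, 1), (1, 0, 0)),
--     ((0, 0, -1), (0, 1, 0), (1, 0, 0)),
-- )
--
--
-- def orientations(v):
--     '''All 24 orientations'''
--     x, y, z = v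
--     for (a, b, c), (d, e, f), (g, h, i) in _ROT:
--         yield (a * x + b * y + c * z, d * x + e * y + f * z, g * x + h * y + i * z)
-- ===== Notes on version B (the rewrite author's own statement) =====
-- stated objective: idiomatic
-- what changed: Replaced A's iterative roll/turn state mutation (nested loops composing rotations step by step) with a single flat pass over a precomputed table of the 24 rotation matrices in A's emission order, applying each matrix to the original vector.
import Mathlib
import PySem

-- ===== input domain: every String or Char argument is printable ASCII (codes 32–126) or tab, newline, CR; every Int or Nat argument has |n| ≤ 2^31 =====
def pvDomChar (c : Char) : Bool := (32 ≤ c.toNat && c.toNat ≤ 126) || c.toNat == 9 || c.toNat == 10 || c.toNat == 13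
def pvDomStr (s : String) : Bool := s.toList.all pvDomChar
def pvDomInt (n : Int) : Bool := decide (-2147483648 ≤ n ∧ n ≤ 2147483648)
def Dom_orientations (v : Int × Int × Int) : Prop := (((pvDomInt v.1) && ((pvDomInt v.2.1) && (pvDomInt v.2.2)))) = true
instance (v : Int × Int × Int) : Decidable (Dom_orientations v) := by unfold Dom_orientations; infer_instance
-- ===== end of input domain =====

-- B replaces A's iterative roll/turn mutation with one flat pass over a fixed
-- table of the 24 rotation matrices in the same emission order (idiomatic).

-- ===== PORT A =====
def pvRoll (v : Int × Int × Int) : Int × Int × Int := (v.1, v.2.2, -v.2.1)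

def pvTurn (v : Int × Int × Int) : Int × Int × Int := (-v.2.1, v.1, v.2.2)

-- inner `for around_z in range(4): yield v; v = turn(v)` loop, as a fold over the range
def pvTurnLoop (st : (Int × Int × Int) × List (Int × Int × Int)) :
    (Int × Int × Int) × List (Int × Int × Int) :=
  (PySem.List.pyRange 0 4 1).foldl (fun st _ => (pvTurn st.1, st.2 ++ [st.1])) st

def orientations (v : Int × Int × Int) : List (Int × Int × Int) :=
  let s1 := (PySem.List.pyRange 0 4 1).foldl
      (fun st _ => let st' := pvTurnLoop st; (pvRoll st'.1, st'.2)) (v, [])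
  let s2 := pvTurnLoop (pvRoll (pvTurn s1.1), s1.2)
  let s3 := pvTurnLoop (pvRoll (pvRoll s2.1), s2.2)
  s3.2

-- ===== PORT B =====
def pvRotTable : List ((Int × Int × Int) × (Int × Int × Int) × (Int × Int × Int)) :=
  [ ((1, 0, 0), (0, 1, 0), (0, 0, 1)),
    ((0, -1, 0), (1, 0, 0), (0, 0, 1)),
    ((-1, 0, 0), (0, -1, 0), (0, 0, 1)),
    ((0, 1, 0), (-1, 0, 0), (0, 0, 1)),
    ((1, 0, 0), (0, 0, 1), (0, -1, 0)),
    ((0, 0, -1), (1, 0, 0), (0, -1, 0)),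
    ((-1, 0, 0), (0, 0, -1), (0, -1, 0)),
    ((0, 0, 1), (-1, 0, 0), (0, -1, 0)),
    ((1, 0, 0), (0, -1, 0), (0, 0, -1)),
    ((0, 1, 0), (1, 0, 0), (0, 0, -1)),
    ((-1, 0, 0), (0, 1, 0), (0, 0, -1)),
    ((0, -1, 0), (-1, 0, 0), (0, 0, -1)),
    ((1, 0, 0), (0, 0, -1), (0, 1, 0)),
    ((0, 0, 1), (1, 0, 0), (0, 1, 0)),
    ((-1, 0, 0), (0, 0, 1), (0, 1, 0)),
    ((0, 0, -1), (-1, 0, 0), (0, 1, 0)),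
    ((0, -1, 0), (0, 0, 1), (-1, 0, 0)),
    ((0, 0, -1), (0, -1, 0), (-1, 0, 0)),
    ((0, 1, 0), (0, 0, -1), (-1, 0, 0)),
    ((0, 0, 1), (0, 1, 0), (-1, 0, 0)),
    ((0, -1, 0), (0, 0, -1), (1, 0, 0)),
    ((0, 0, 1), (0, -1, 0), (1, 0, 0)),
    ((0, 1, 0), (0, 0, 1), (1, 0, 0)),
    ((0, 0, -1), (0, 1, 0), (1, 0, 0)) ]

def orientations_alt (v : Int × Int × Int) : List (Int × Int × Int) :=
  pvRotTable.map (fun m =>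
    (m.1.1 * v.1 + m.1.2.1 * v.2.1 + m.1.2.2 * v.2.2,
     m.2.1.1 * v.1 + m.2.1.2.1 * v.2.1 + m.2.1.2.2 * v.2.2,
     m.2.2.1 * v.1 + m.2.2.2.1 * v.2.1 + m.2.2.2.2 * v.2.2))

-- ===== PRECONDITION & SPEC =====
def Spec_orientations (v : Int × Int × Int) (out : List (Int × Int × Int)) : Prop := out = orientations_alt v
instance (v : Int × Int × Int) (out : List (Int × Int × Int)) : Decidable (Spec_orientations v out) := by unfold Spec_orientations; infer_instance

-- ===== CLAIM (what is proved, stated in full; the proofs are below) =====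
def Claim_equal_orientations : Prop := ∀ (v : Int × Int × Int), Dom_orientations v → Spec_orientations v (orientations v)

-- ===== LEMMAS AND PROOFS =====

-- ===== VERDICT (by name: the statement is the Claim_ definition above) =====
theorem orientations_spec : Claim_equal_orientations := by
  intro v _
  obtain ⟨x, y, z⟩ := v
  unfold Spec_orientations
  simp only [orientations, orientations_alt, pvTurnLoop, pvRoll, pvTurn, pvRotTable,
    show PySem.List.pyRange 0 4 1 = [0, 1, 2, 3] from by decide,
    List.foldl_cons, List.foldl_nil, List.map_cons, List.map_nil, List.append_assoc,
    List.cons_append, List.nil_append]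
  norm_num
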